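-- pv_equiv track=rewrite | github.com/OpenGenus/falcon | dist/openfalcon-0.0.1/services/recommendationUtils.py | getParentWeightedList
-- ===== SOURCE A (Python) =====
-- def getMaxDepth(l):
--   maxDepth = 1
--   for data in l:
--     maxDepth = max(maxDepth,len(data.split("/")))
--   return maxDepth
--
-- def getParentWeightedList(l):
--   maxDepth = getMaxDepth(l)
--   parentWeights =  []
--   for i in range(0,maxDepth):
--     parentWeights.append([])
--   for data in l:
--     i=0
--     for  path in data.split("/"):
--       parentWeights[i].append(path)
--       i=i+1
--   return parentWeights
-- ===== SOURCE B (Python) =====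
-- def getParentWeightedList(l):
--     splits = [data.split("/") for data in l]
--     maxDepth = max((len(s) for s in splits), default=1)
--     return [[parts[i] for parts in splits if i < len(parts)] for i in range(maxDepth)]
-- ===== Notes on version B (the rewrite author's own statement) =====
-- stated objective: alternative
-- what changed: B splits every string once, takes the max column count with a floor of 1, and builds the result column-major by filtering each depth index, instead of A's preallocate-buckets-then-scatter-appends-with-an-index-counter pass.
import Mathlib
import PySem

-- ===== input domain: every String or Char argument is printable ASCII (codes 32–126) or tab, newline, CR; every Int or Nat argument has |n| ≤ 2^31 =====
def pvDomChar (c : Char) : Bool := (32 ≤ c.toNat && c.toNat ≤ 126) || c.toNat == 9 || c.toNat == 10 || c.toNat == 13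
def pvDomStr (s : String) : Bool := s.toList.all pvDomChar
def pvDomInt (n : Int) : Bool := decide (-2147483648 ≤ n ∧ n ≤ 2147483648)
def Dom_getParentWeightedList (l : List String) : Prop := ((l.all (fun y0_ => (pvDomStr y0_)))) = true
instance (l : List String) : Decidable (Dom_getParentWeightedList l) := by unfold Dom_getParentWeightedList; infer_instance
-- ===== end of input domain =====

-- B builds the result column-major (one filtered pass per depth index) instead of A's
-- preallocate-then-scatter pass; same cost, different decomposition ("alternative").

-- data.split("/"): the separator is the non-empty literal "/", so Python never raises here
def pySplit (s : String) : List String := (PySem.Str.split? s "/").getD []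

-- ===== PORT A =====
def getMaxDepth (l : List String) : Nat :=
  l.foldl (fun maxDepth data => max maxDepth (pySplit data).length) 1

-- parentWeights[i].append(path) (i is always in range in A)
def pvAppendAt (pw : List (List String)) (i : Nat) (p : String) : List (List String) :=
  pw.set i ((pw.getD i []) ++ [p])

def getParentWeightedList (l : List String) : List (List String) :=
  let maxDepth := getMaxDepth l
  let init := (List.range maxDepth).foldl (fun acc _ => acc ++ [([] : List String)]) []
  l.foldl (fun pw data =>
    ((pySplit data).foldl (fun st path => (pvAppendAt st.1 st.2 path, st.2 + 1)) (pw, 0)).1)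
    init

-- ===== PORT B =====
def getParentWeightedList_alt (l : List String) : List (List String) :=
  let splits := l.map pySplit
  let maxDepth :=
    match splits.map List.length with   -- max(…, default=1)
    | [] => 1
    | x :: xs => xs.foldl max x
  (List.range maxDepth).map (fun i =>
    (splits.filter (fun parts => decide (i < parts.length))).map (fun parts => parts.getD i ""))

-- ===== PRECONDITION & SPEC =====
def Spec_getParentWeightedList (l : List String) (out : List (List String)) : Prop := out = getParentWeightedList_alt l
instance (l : List String) (out : List (List String)) : Decidable (Spec_getParentWeightedList l out) := by unfold Spec_getParentWeightedList; infer_instance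

-- ===== CLAIM (what is proved, stated in full; the proofs are below) =====
def Claim_equal_getParentWeightedList : Prop := ∀ (l : List String), Dom_getParentWeightedList l → Spec_getParentWeightedList l (getParentWeightedList l)

-- ===== LEMMAS AND PROOFS =====

-- split never returns an empty list (Python's s.split(sep) yields at least one piece)
theorem splitOn_go_pos (sep : List Char) (fuel : Nat) :
    ∀ (s cur : List Char) (acc : List (List Char)),
      1 ≤ (PySem.Chars.splitOn.go sep fuel s cur acc).length := by
  induction fuel with
  | zero => intro s cur acc; simp [PySem.Chars.splitOn.go]
  | succ n ih =>
      intro s cur acc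
      cases s with
      | nil => simp [PySem.Chars.splitOn.go]
      | cons c rest =>
          rw [PySem.Chars.splitOn.go]
          split
          · exact ih _ _ _
          · exact ih _ _ _

theorem pySplit_pos (s : String) : 1 ≤ (pySplit s).length := by
  have h : 1 ≤ (PySem.Chars.splitOn s.toList ['/']).length :=
    splitOn_go_pos _ _ _ _ _
  simp [pySplit, PySem.Str.split?, PySem.Chars.split?]
  simpa using h

-- the zip-style description of A's inner scatter loop
def zipA : List (List String) → List String → List (List String)
  | pw, [] => pw
  | [], _ :: _ => []
  | b :: pw, p :: ps => (b ++ [p]) :: zipA pw ps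

theorem zipA_nil_left : ∀ ps : List String, zipA [] ps = [] := by
  intro ps; cases ps <;> rfl

theorem innerA_eq (parts : List String) :
    ∀ (pw : List (List String)) (i : Nat),
      (parts.foldl (fun st path => (pvAppendAt st.1 st.2 path, st.2 + 1)) (pw, i)).1
        = pw.take i ++ zipA (pw.drop i) parts := by
  induction parts with
  | nil => intro pw i; simp [zipA]
  | cons p ps ih =>
      intro pw i
      simp only [List.foldl_cons]
      rw [ih]
      by_cases h : i < pw.length
      · have hset : pvAppendAt pw i p = pw.take i ++ (pw[i] ++ [p]) :: pw.drop (i + 1) := by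
          simp [pvAppendAt, List.set_eq_take_append_cons_drop, h, List.getD]
        have hdrop : pw.drop i = pw[i] :: pw.drop (i + 1) := List.drop_eq_getElem_cons h
        have hlen : (pw.take i).length = i := by simp [h.le]
        have t1 : List.take (i + 1) (pw.take i) = pw.take i :=
          List.take_of_length_le (by omega)
        have t2 : List.drop (i + 1) (pw.take i) = [] :=
          List.drop_eq_nil_of_le (by omega)
        have t3 : i + 1 - i = 1 := by omega
        rw [hset, List.take_append, List.drop_append, hlen, t1, t2, t3, hdrop]
        simp [zipA]
      · have hge : pw.length ≤ i := Nat.le_of_not_lt h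
        have hset : pvAppendAt pw i p = pw := by
          simp [pvAppendAt, List.set_eq_of_length_le hge]
        rw [hset]
        have h1 : pw.drop i = [] := List.drop_eq_nil_of_le hge
        have h2 : pw.drop (i + 1) = [] := List.drop_eq_nil_of_le (by omega)
        simp [h1, h2, List.take_of_length_le, hge, Nat.le_succ_of_le, zipA_nil_left]

theorem zipA_length (parts : List String) :
    ∀ pw : List (List String), parts.length ≤ pw.length → (zipA pw parts).length = pw.length := by
  induction parts with
  | nil => intro pw _; simp [zipA]
  | cons p ps ih =>
      intro pw h
      cases pw with
      | nil => simp at h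
      | cons b pw' =>
          simp [zipA]
          exact ih pw' (by simpa using h)

theorem zipA_get (parts : List String) :
    ∀ (pw : List (List String)) (j : Nat), parts.length ≤ pw.length →
      (zipA pw parts)[j]? = (pw[j]?).map (fun b => b ++ (parts[j]?).toList) := by
  induction parts with
  | nil =>
      intro pw j _
      simp [zipA]
  | cons p ps ih =>
      intro pw j h
      cases pw with
      | nil => simp at h
      | cons b pw' =>
          cases j with
          | zero => simp [zipA]
          | succ j' =>
              simp [zipA]
              exact ih pw' j' (by simpa using h)

theorem foldZ_get (ds : List String) :
    ∀ (pw : List (List String)) (j : Nat),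
      (∀ d ∈ ds, (pySplit d).length ≤ pw.length) →
      (ds.foldl (fun acc d => zipA acc (pySplit d)) pw)[j]?
        = (pw[j]?).map (fun b => b ++ ds.filterMap (fun d => (pySplit d)[j]?)) := by
  induction ds with
  | nil =>
      intro pw j _
      simp
  | cons d ds ih =>
      intro pw j h
      have hd : (pySplit d).length ≤ pw.length := h d (by simp)
      have hlen : (zipA pw (pySplit d)).length = pw.length := zipA_length _ _ hd
      simp only [List.foldl_cons]
      rw [ih _ j (fun e he => by rw [hlen]; exact h e (by simp [he]))]
      rw [zipA_get _ _ _ hd]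
      cases hpj : pw[j]? with
      | none => simp
      | some b =>
          cases hsj : (pySplit d)[j]? with
          | none => simp [hsj]
          | some v => simp [hsj]

theorem init_replicate (n : Nat) :
    (List.range n).foldl (fun acc _ => acc ++ [([] : List String)]) [] = List.replicate n [] := by
  induction n with
  | zero => simp
  | succ m ih => rw [List.range_succ, List.foldl_append, ih]; simp [List.replicate_succ']

theorem le_foldl_max_init (f : String → Nat) (l : List String) :
    ∀ a : Nat, a ≤ l.foldl (fun m x => max m (f x)) a := by
  induction l with
  | nil => intro a; simp
  | cons x xs ih =>
      intro a
      exact le_trans (Nat.le_max_left a (f x)) (ih (max a (f x)))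

theorem mem_le_foldl_max (f : String → Nat) (l : List String) :
    ∀ (a : Nat) (d : String), d ∈ l → f d ≤ l.foldl (fun m x => max m (f x)) a := by
  induction l with
  | nil => intro a d hd; simp at hd
  | cons x xs ih =>
      intro a d hd
      rcases List.mem_cons.mp hd with h | h
      · subst h
        exact le_trans (Nat.le_max_right a (f d)) (le_foldl_max_init f xs _)
      · exact ih _ d h

-- B's maxDepth equals A's getMaxDepth
theorem maxDepth_eq (l : List String) :
    (match l.map pySplit |>.map List.length with
      | [] => 1
      | x :: xs => xs.foldl max x) = getMaxDepth l := by
  cases l with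
  | nil => simp [getMaxDepth]
  | cons d ds =>
      simp only [List.map_cons, getMaxDepth, List.foldl_cons]
      have h1 : max 1 (pySplit d).length = (pySplit d).length :=
        Nat.max_eq_right (pySplit_pos d)
      rw [h1, List.map_map, List.foldl_map]
      simp [Function.comp]

theorem filter_map_eq_filterMap (j : Nat) (S : List (List String)) :
    (S.filter (fun p => decide (j < p.length))).map (fun p => (p[j]?).getD "")
      = S.filterMap (fun p => p[j]?) := by
  induction S with
  | nil => simp
  | cons p ps ih =>
      by_cases h : j < p.length
      · rw [List.filter_cons_of_pos (by simpa using h), List.map_cons, ih,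
          List.filterMap_cons, List.getElem?_eq_getElem h]
        simp
      · rw [List.filter_cons_of_neg (by simpa using h), ih, List.filterMap_cons,
          List.getElem?_eq_none_iff.mpr (Nat.le_of_not_lt h)]

theorem foldl_congr' {A B : Type} (f g : A → B → A) (h : ∀ a b, f a b = g a b)
    (l : List B) : ∀ init : A, l.foldl f init = l.foldl g init := by
  induction l with
  | nil => intro init; rfl
  | cons x xs ih => intro init; simp only [List.foldl_cons, h, ih]

-- ===== VERDICT (by name: the statement is the Claim_ definition above) =====
theorem getParentWeightedList_spec : Claim_equal_getParentWeightedList := by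
  intro l _
  unfold Spec_getParentWeightedList getParentWeightedList getParentWeightedList_alt
  simp only []
  rw [maxDepth_eq]
  set M := getMaxDepth l with hM
  have hbound : ∀ d ∈ l, (pySplit d).length ≤ M :=
    fun d hd => mem_le_foldl_max (fun s => (pySplit s).length) l 1 d hd
  have hstep : ∀ (pw : List (List String)) (data : String),
      ((pySplit data).foldl (fun st path => (pvAppendAt st.1 st.2 path, st.2 + 1)) (pw, 0)).1
        = zipA pw (pySplit data) := by
    intro pw data
    rw [innerA_eq]
    simp
  rw [foldl_congr' _ _ hstep]
  rw [init_replicate]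
  have hrep : ∀ d ∈ l, (pySplit d).length ≤ (List.replicate M ([] : List String)).length := by
    simpa using hbound
  apply List.ext_getElem?
  intro j
  rw [foldZ_get l _ j hrep]
  by_cases hj : j < M
  · rw [List.getElem?_replicate_of_lt hj]
    rw [List.getElem?_map, List.getElem?_range hj]
    simp only [Option.map_some, List.getD_eq_getElem?_getD]
    rw [filter_map_eq_filterMap]
    simp
  · have h1 : (List.replicate M ([] : List String))[j]? = none := by
      rw [List.getElem?_eq_none_iff]; simpa using Nat.le_of_not_lt hj
    have h2 : ((List.range M).map (fun i =>
        ((l.map pySplit).filter (fun parts => decide (i < parts.length))).map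
          (fun parts => parts.getD i "")))[j]? = none := by
      rw [List.getElem?_eq_none_iff]; simpa using Nat.le_of_not_lt hj
    rw [h1, h2]
    simp
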